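-- pv_equiv track=rewrite | github.com/Pk13055/bomberman | config.py | getcc
-- ===== SOURCE A (Python) =====
-- _wall = "X"
--
-- _bricks = "/"
--
-- _bomb_man = "B"
--
-- _enemy = "E"
--
-- _expl = "e"
--
-- _empty = " "
--
-- colors = {
--     'Black'            : '\x1b[0;30m',
--     'Blue'             : '\x1b[0;34m',
--     'Green'            : '\x1b[0;32m',
--     'Cyan'             : '\x1b[0;36m',
--     'Red'              : '\x1b[0;31m',
--     'Purple'           : '\x1b[0;35m',
--     'Brown'            : '\x1b[0;33m',
--     'Gray'             : '\x1b[0;37m',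
--     'Dark Gray'        : '\x1b[1;30m',
--     'Light Blue'       : '\x1b[1;34m',
--     'Light Green'      : '\x1b[1;32m',
--     'Light Cyan'       : '\x1b[1;36m',
--     'Light Red'        : '\x1b[1;31m',
--     'Light Purple'     : '\x1b[1;35m',
--     'Yellow'           : '\x1b[1;33m',
--     'White'            : '\x1b[1;37m'
-- }
--
-- ENDC = '\x1b[0m'
--
-- def getcc(ch):
--
--     try:
--         if ch == _empty:
--             return ch
--         elif ch == _wall:
--             color = 'Dark Gray'
--         elif ch == _bomb_man:
--             color = 'Blue'
--         elif ch == _enemy: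
--             color = 'Red'
--         elif ch == _bricks:
--             color = 'Brown'
--         elif ch == _expl:
--             color = 'Yellow'
--         elif ch in [str(x) for x in range(10)]:
--             color = 'White'
--         elif ch == '[' or ch == ']':
--             color = 'Purple'
--         else:
--             color = 'None'
--         return colors[color] + ch + ENDC
--     except KeyError:
--         return ch
-- ===== SOURCE B (Python) =====
-- # Alternative strategy: classify ch into a numeric (style, hue) pair -- digit-class
-- # test plus one linear scan of parallel key/style/hue data -- and build the ANSI
-- # escape sequence numerically, instead of A's if/elif ladder naming a color and
-- # indexing a name->literal dict.
-- ENDC = '\x1b[0m'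
-- _KEYS = "XBE/e[]"
-- _STYLE = (1, 0, 0, 0, 1, 0, 0)
-- _HUE = (30, 34, 31, 33, 33, 35, 35)
--
-- def getcc(ch):
--     if ch == ' ':
--         return ch
--     if len(ch) == 1 and ch.isdigit():
--         return '\x1b[1;37m' + ch + ENDC
--     for key, style, hue in zip(_KEYS, _STYLE, _HUE):
--         if ch == key:
--             return '\x1b[' + str(style) + ';' + str(hue) + 'm' + ch + ENDC
--     return ch
-- ===== Notes on version B (the rewrite author's own statement) =====
-- stated objective: alternative
-- what changed: Instead of A's if/elif ladder that picks a color NAME and indexes a name-to-literal colors dict (with KeyError fallback), B classifies ch into a numeric (style,hue) pair -- a digit-class test plus one linear scan over parallel key/style/hue sequences -- and constructs the escape sequence numerically from those ints.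
import Mathlib
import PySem

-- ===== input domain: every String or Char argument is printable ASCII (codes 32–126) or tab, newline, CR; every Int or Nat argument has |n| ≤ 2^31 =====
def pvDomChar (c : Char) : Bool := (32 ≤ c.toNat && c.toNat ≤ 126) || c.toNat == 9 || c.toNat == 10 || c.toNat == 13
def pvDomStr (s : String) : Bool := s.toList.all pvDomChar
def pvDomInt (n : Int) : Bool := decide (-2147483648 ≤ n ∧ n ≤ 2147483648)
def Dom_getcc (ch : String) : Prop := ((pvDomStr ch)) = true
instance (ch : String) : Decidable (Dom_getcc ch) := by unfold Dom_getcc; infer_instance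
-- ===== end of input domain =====

-- B classifies ch into a numeric (style, hue) pair (digit-class test + one scan of
-- parallel key/style/hue data) and builds the escape sequence from those ints, instead
-- of A's if/elif ladder naming a color and indexing a name→literal dict; objective: alternative.

-- ===== PORT A =====
def pvColors : PySem.Dict String String := PySem.Dict.ofList
  [("Black", "\x1b[0;30m"), ("Blue", "\x1b[0;34m"), ("Green", "\x1b[0;32m"),
   ("Cyan", "\x1b[0;36m"), ("Red", "\x1b[0;31m"), ("Purple", "\x1b[0;35m"),
   ("Brown", "\x1b[0;33m"), ("Gray", "\x1b[0;37m"), ("Dark Gray", "\x1b[1;30m"),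
   ("Light Blue", "\x1b[1;34m"), ("Light Green", "\x1b[1;32m"),
   ("Light Cyan", "\x1b[1;36m"), ("Light Red", "\x1b[1;31m"),
   ("Light Purple", "\x1b[1;35m"), ("Yellow", "\x1b[1;33m"), ("White", "\x1b[1;37m")]

def pvENDC : String := "\x1b[0m"

def getcc (ch : String) : String :=
  if ch = " " then ch
  else
    let color : String :=
      if ch = "X" then "Dark Gray"
      else if ch = "B" then "Blue"
      else if ch = "E" then "Red"
      else if ch = "/" then "Brown"
      else if ch = "e" then "Yellow"
      else if ((PySem.List.pyRange 0 10 1).map PySem.Int.toStr).contains ch then "White"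
      else if ch = "[" ∨ ch = "]" then "Purple"
      else "None"
    -- colors[color] + ch + ENDC, with 'except KeyError: return ch'
    match pvColors.get? color with
    | some c => c ++ ch ++ pvENDC
    | none => ch

-- ===== PORT B =====
def pvENDC_B : String := "\x1b[0m"

-- Source B's for-loop over zip(_KEYS, _STYLE, _HUE) with early return
def pvScan (ch : String) : List (String × Int × Int) → String
  | [] => ch
  | (key, style, hue) :: rest =>
      if ch = key then
        "\x1b[" ++ PySem.Int.toStr style ++ ";" ++ PySem.Int.toStr hue ++ "m" ++ ch ++ pvENDC_B
      else pvScan ch rest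

-- zip(_KEYS, _STYLE, _HUE): iterating a Python str yields 1-char strings
def pvTriples : List (String × Int × Int) :=
  ("XBE/e[]".toList.map fun c => String.ofList [c]).zip
    (([1, 0, 0, 0, 1, 0, 0] : List Int).zip ([30, 34, 31, 33, 33, 35, 35] : List Int))

def getcc_alt (ch : String) : String :=
  if ch = " " then ch
  else if PySem.Str.len ch = 1 ∧ PySem.Str.strIsdigit ch = true then
    "\x1b[1;37m" ++ ch ++ pvENDC_B
  else pvScan ch pvTriples

-- ===== PRECONDITION & SPEC =====
def Spec_getcc (ch : String) (out : String) : Prop := out = getcc_alt ch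
instance (ch : String) (out : String) : Decidable (Spec_getcc ch out) := by unfold Spec_getcc; infer_instance

-- ===== CLAIM (what is proved, stated in full; the proofs are below) =====
def Claim_equal_getcc : Prop := ∀ (ch : String), Dom_getcc ch → Spec_getcc ch (getcc ch)

-- ===== LEMMAS AND PROOFS =====
theorem char_eq_of_toNat (c d : Char) (h : c.toNat = d.toNat) : c = d := by
  apply Char.ext
  apply UInt32.toNat_inj.mp
  exact h

theorem digit_mem (c : Char) (h1 : '0' ≤ c) (h2 : c ≤ '9') :
    c ∈ ['0','1','2','3','4','5','6','7','8','9'] := by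
  have h1' : 48 ≤ c.toNat := h1
  have h2' : c.toNat ≤ 57 := h2
  have hcase : c.toNat = 48 ∨ c.toNat = 49 ∨ c.toNat = 50 ∨ c.toNat = 51 ∨ c.toNat = 52 ∨
      c.toNat = 53 ∨ c.toNat = 54 ∨ c.toNat = 55 ∨ c.toNat = 56 ∨ c.toNat = 57 := by omega
  rcases hcase with h|h|h|h|h|h|h|h|h|h <;>
    [ (have := char_eq_of_toNat c '0' h); (have := char_eq_of_toNat c '1' h);
      (have := char_eq_of_toNat c '2' h); (have := char_eq_of_toNat c '3' h);
      (have := char_eq_of_toNat c '4' h); (have := char_eq_of_toNat c '5' h);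
      (have := char_eq_of_toNat c '6' h); (have := char_eq_of_toNat c '7' h);
      (have := char_eq_of_toNat c '8' h); (have := char_eq_of_toNat c '9' h)] <;>
    simp [this]

theorem digit_str (ch : String) (hl : ch.length = 1)
    (hd : PySem.Chars.strIsdigit ch.toList = true) :
    ch ∈ (["0","1","2","3","4","5","6","7","8","9"] : List String) := by
  have hlen : ch.toList.length = 1 := by simp [hl]
  obtain ⟨c, hc⟩ := List.length_eq_one_iff.mp hlen
  rw [hc] at hd
  simp [PySem.Chars.strIsdigit, PySem.Chars.isdigit] at hd
  have hch : ch = String.ofList [c] := by rw [← hc, String.ofList_toList]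
  subst hch
  have hm := digit_mem c hd.1 hd.2
  fin_cases hm <;> decide

-- ===== VERDICT (by name: the statement is the Claim_ definition above) =====
theorem getcc_spec : Claim_equal_getcc := by
  intro ch _
  unfold Spec_getcc
  by_cases h : ch ∈ ([" ", "X", "B", "E", "e", "/", "[", "]",
      "0", "1", "2", "3", "4", "5", "6", "7", "8", "9"] : List String)
  · fin_cases h <;> decide
  · simp only [List.mem_cons, List.not_mem_nil, or_false, not_or] at h
    obtain ⟨hsp, hX, hB, hE, he, hsl, hlb, hrb, d0, d1, d2, d3, d4, d5, d6, d7, d8, d9⟩ := h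
    have hrange : ((PySem.List.pyRange 0 10 1).map PySem.Int.toStr)
        = ["0", "1", "2", "3", "4", "5", "6", "7", "8", "9"] := by decide
    have ht : pvTriples = [("X", (1, 30)), ("B", (0, 34)), ("E", (0, 31)), ("/", (0, 33)),
        ("e", (1, 33)), ("[", (0, 35)), ("]", (0, 35))] := by decide
    simp [getcc, getcc_alt, hrange, ht, pvScan,
      hsp, hX, hB, hE, he, hsl, hlb, hrb, d0, d1, d2, d3, d4, d5, d6, d7, d8, d9,
      show pvColors.get? "None" = none from by decide]
    intro hl hd
    exact absurd (digit_str ch hl hd)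
      (by simp [d0, d1, d2, d3, d4, d5, d6, d7, d8, d9])
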